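-- pv_equiv track=rewrite | github.com/akhilkarra/python-lab | src/aops/week7.py | string_to_non_space_characters
-- ===== SOURCE A (Python) =====
-- import typing
--
-- def string_to_non_space_characters(string: str) -> typing.List[str]:
--     """
--     Returns a list of non-space characters found in string
--
--     Args:
--         :param string: The input string from which to extract all characters
--
--     Raises:
--         None.
--
--     Returns:
--         A list of all characters in string not including spaces
--     """
--     words = string.lower().split()  # Make the string lowercase and split it into words
--     words_split = [
--         list(word) for word in words
--     ]  # Split the words up into lists of letters
--     return [
--         char for word in words_split for char in word
--     ]  # Flatten the list and return it
-- ===== SOURCE B (Python) =====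
-- import typing
--
-- def string_to_non_space_characters(string: str) -> typing.List[str]:
--     # Single flat pass: lowercase once, keep each non-whitespace character.
--     return [c for c in string.lower() if not c.isspace()]
-- ===== Notes on version B (the rewrite author's own statement) =====
-- stated objective: idiomatic
-- what changed: Replaces the split-into-words / list(word) / nested flatten with a single character-level pass that filters out whitespace from the lowercased string.
import Mathlib
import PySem

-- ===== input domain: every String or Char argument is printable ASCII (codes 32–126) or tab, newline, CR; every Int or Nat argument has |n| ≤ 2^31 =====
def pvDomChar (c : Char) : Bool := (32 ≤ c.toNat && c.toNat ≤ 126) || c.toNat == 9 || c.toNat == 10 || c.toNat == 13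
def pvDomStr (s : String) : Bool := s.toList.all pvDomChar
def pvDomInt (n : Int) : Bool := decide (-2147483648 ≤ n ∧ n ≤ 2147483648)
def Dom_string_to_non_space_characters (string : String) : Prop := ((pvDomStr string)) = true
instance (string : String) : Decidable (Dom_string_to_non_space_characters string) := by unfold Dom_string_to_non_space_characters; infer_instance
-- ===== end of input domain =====

-- B replaces A's split-into-words + list(word) + flatten with one filtering pass over the lowercased string (idiomatic, same cost).


-- ===== PORT A =====
-- words = string.lower().split(); words_split = [list(word) for word in words]; return [char for word in words_split for char in word]
def string_to_non_space_characters (string : String) : List String :=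
  let words : List String := PySem.Str.split₀ (PySem.Str.lower string)
  let words_split : List (List String) :=
    words.map (fun word => word.toList.map (fun c => String.ofList [c]))
  (words_split.map (fun word => word.map (fun char => char))).flatten

-- ===== PORT B =====
-- return [c for c in string.lower() if not c.isspace()]
def string_to_non_space_characters_alt (string : String) : List String :=
  ((PySem.Str.lower string).toList.filter
      (fun c => !(PySem.Chars.isspace c))).map (fun c => String.ofList [c])

-- ===== PRECONDITION & SPEC =====
def Spec_string_to_non_space_characters (string : String) (out : List String) : Prop := out = string_to_non_space_characters_alt string
instance (string : String) (out : List String) : Decidable (Spec_string_to_non_space_characters string out) := by unfold Spec_string_to_non_space_characters; infer_instance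

-- ===== CLAIM (what is proved, stated in full; the proofs are below) =====
def Claim_equal_string_to_non_space_characters : Prop := ∀ (string : String), Dom_string_to_non_space_characters string → Spec_string_to_non_space_characters string (string_to_non_space_characters string)

-- ===== LEMMAS AND PROOFS =====

/-- Loop invariant for `split₀.go`: flattening its result yields the already
    collected words, the (reversed) current word, and the non-space characters
    of the remaining input. -/
lemma split₀_go_flatten (s cur : List Char) (acc : List (List Char)) :
    (PySem.Chars.split₀.go s cur acc).flatten =
      acc.reverse.flatten ++ cur.reverse ++ s.filter (fun c => !(PySem.Chars.isspace c)) := by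
  induction s generalizing cur acc with
  | nil =>
      simp only [PySem.Chars.split₀.go, List.filter_nil, List.append_nil]
      split_ifs with h
      · simp [List.isEmpty_iff.mp h]
      · simp
  | cons c rest ih =>
      simp only [PySem.Chars.split₀.go]
      split_ifs with hsp hemp
      · simp [ih, List.isEmpty_iff.mp hemp, hsp]
      · simp [ih, hsp]
      · simp [ih, hsp]

/-- Flattening the words of `split₀` gives exactly the non-space characters. -/
lemma split₀_flatten (cs : List Char) :
    (PySem.Chars.split₀ cs).flatten = cs.filter (fun c => !(PySem.Chars.isspace c)) := by
  simp [PySem.Chars.split₀, split₀_go_flatten]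

-- ===== VERDICT (by name: the statement is the Claim_ definition above) =====
theorem string_to_non_space_characters_spec : Claim_equal_string_to_non_space_characters := by
  intro s _
  unfold Spec_string_to_non_space_characters
  unfold string_to_non_space_characters string_to_non_space_characters_alt
  simp only [List.map_id']
  have key : ∀ (ws : List String),
      (ws.map (fun word => word.toList.map (fun c => String.ofList [c]))).flatten =
        ((ws.map String.toList).flatten).map (fun c => String.ofList [c]) := by
    intro ws
    rw [List.map_flatten, List.map_map]; rfl
  rw [key (PySem.Str.split₀ (PySem.Str.lower s)), PySem.Str.split₀_map_toList, split₀_flatten]
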